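-- pv_equiv track=rewrite | github.com/CrashSystemZ/spiw-bot | spiw/providers/threads.py | _pick_video_candidate
-- ===== SOURCE A (Python) =====
-- _VIDEO_TYPE_PRIORITY = {101: 0, 102: 1, 103: 2}
--
-- def _pick_video_candidate(media: dict) -> str | None:
--     candidates = []
--     for variant in media.get("video_versions") or []:
--         url = variant.get("url")
--         if not isinstance(url, str) or not url.startswith("http"):
--             continue
--         variant_type = _VIDEO_TYPE_PRIORITY.get(
--             int(variant.get("type", 99)) if variant.get("type") is not None else 99, 99
--         )
--         candidates.append((variant_type, url))
--     if not candidates: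
--         return None
--     candidates.sort(key=lambda c: c[0])
--     return candidates[0][1]
-- ===== SOURCE B (Python) =====
-- _VIDEO_TYPE_PRIORITY = {101: 0, 102: 1, 103: 2}
--
-- def _pick_video_candidate(media: dict) -> str | None:
--     # Single pass keeping the best candidate so far; no list, no sort.
--     best_priority = None
--     best_url = None
--     for variant in media.get("video_versions") or []:
--         url = variant.get("url")
--         if not isinstance(url, str) or not url.startswith("http"):
--             continue
--         t = variant.get("type")
--         priority = _VIDEO_TYPE_PRIORITY.get(int(t) if t is not None else 99, 99)
--         if best_priority is None or priority < best_priority: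
--             best_priority = priority
--             best_url = url
--     return best_url
-- ===== Notes on version B (the rewrite author's own statement) =====
-- stated objective: simpler
-- what changed: Replaced build-candidate-list-then-stable-sort-and-take-head with a single streaming pass that keeps the best (lowest-priority, first-seen) url in two scalars; strict '<' reproduces the stable sort's first-occurrence tie-break.
import Mathlib
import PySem

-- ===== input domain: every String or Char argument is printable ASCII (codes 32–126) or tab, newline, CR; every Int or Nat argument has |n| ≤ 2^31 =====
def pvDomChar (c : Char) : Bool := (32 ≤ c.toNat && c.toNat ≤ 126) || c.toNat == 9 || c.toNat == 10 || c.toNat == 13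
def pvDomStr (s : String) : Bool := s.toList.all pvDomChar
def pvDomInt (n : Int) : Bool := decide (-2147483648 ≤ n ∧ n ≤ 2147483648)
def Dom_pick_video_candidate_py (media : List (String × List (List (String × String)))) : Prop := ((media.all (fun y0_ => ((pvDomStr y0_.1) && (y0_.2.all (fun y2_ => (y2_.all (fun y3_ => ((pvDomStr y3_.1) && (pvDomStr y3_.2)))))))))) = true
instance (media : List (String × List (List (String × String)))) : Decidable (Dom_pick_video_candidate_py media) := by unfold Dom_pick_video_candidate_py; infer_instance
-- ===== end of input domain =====

-- B replaces A's build-list-then-stable-sort-and-take-head with one streaming pass keeping the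
-- best (lowest priority, first seen) url; objective: simpler.


-- ===== PORT A =====
-- dict.get on an association list (lookup = first match), via the PySem.Dict primitive
def pvGet? {v : Type} (l : List (String × v)) (k : String) : Option v :=
  PySem.Dict.get? (PySem.Dict.mk l) k

-- _VIDEO_TYPE_PRIORITY.get(t, 99)
def pvPrioOf (t : Int) : Int :=
  PySem.Dict.getD (PySem.Dict.mk [((101 : Int), (0 : Int)), ((102 : Int), (1 : Int)), ((103 : Int), (2 : Int))]) t 99

-- the shared subexpression 'int(variant.get("type", 99)) if variant.get("type") is not None else 99'
-- wrapped in the priority lookup; int() raising ValueError is excluded by Pre_, so the .getD 99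
-- default for an unparsable "type" string is never reached on admitted inputs.
def pvVariantType (variant : List (String × String)) : Int :=
  pvPrioOf (match pvGet? variant "type" with
            | some s => (PySem.Int.ofStr? s).getD 99
            | none => 99)

-- literal port of A: collect (priority, url) candidates, stable-sort by priority, take [0][1].
-- (candidates[0][1] on the nonempty branch and the 'if not candidates: return None' branch are
-- rendered together as head? of the sorted list, mapped to the url component; under the type
-- convention variant["url"] is always a str, so the isinstance check is always true.)
def pick_video_candidate_py (media : List (String × List (List (String × String)))) : Option String :=
  let vvs := (pvGet? media "video_versions").getD []
  let candidates : List (Int × String) := vvs.foldl (fun acc variant =>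
      match pvGet? variant "url" with
      | none => acc
      | some url =>
          if PySem.Str.startswith url "http" then acc ++ [(pvVariantType variant, url)]
          else acc) []
  ((PySem.List.sorted candidates (fun c => c.1) false).head?).map (fun c => c.2)

-- ===== PORT B =====
-- literal port of B: one pass over the variants with two scalar accumulators
-- (best_priority, best_url); 'best_priority is None or priority < best_priority' as a match.
def pick_video_candidate_py_alt (media : List (String × List (List (String × String)))) : Option String :=
  let vvs := (pvGet? media "video_versions").getD []
  let best := vvs.foldl (fun (st : Option Int × Option String) variant =>
      match pvGet? variant "url" with
      | none => st
      | some url =>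
          if PySem.Str.startswith url "http" then
            let p := pvVariantType variant
            match st.1 with
            | none => (some p, some url)
            | some bp => if p < bp then (some p, some url) else st
          else st) (none, none)
  best.2

-- ===== PRECONDITION & SPEC =====
-- Pre_ excludes exactly the inputs where Python A raises ValueError: a variant that passes the
-- url check but whose "type" value is a string int() cannot parse.  (B raises there too.)
def Pre_pick_video_candidate_py (media : List (String × List (List (String × String)))) : Prop :=
  (((pvGet? media "video_versions").getD []).all (fun variant =>
      match pvGet? variant "url" with
      | none => true
      | some url =>
          if PySem.Str.startswith url "http" then
            match pvGet? variant "type" with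
            | some s => (PySem.Int.ofStr? s).isSome
            | none => true
          else true)) = true

instance (media : List (String × List (List (String × String)))) : Decidable (Pre_pick_video_candidate_py media) := by
  unfold Pre_pick_video_candidate_py; infer_instance

def pvWitness_pick_video_candidate_py : (List (String × List (List (String × String)))) :=
  [("video_versions", [[("url", "http://a"), ("type", "102")], [("url", "http://b"), ("type", "101")]])]

def Spec_pick_video_candidate_py (media : List (String × List (List (String × String)))) (out : Option String) : Prop := out = pick_video_candidate_py_alt media
instance (media : List (String × List (List (String × String)))) (out : Option String) : Decidable (Spec_pick_video_candidate_py media out) := by unfold Spec_pick_video_candidate_py; infer_instance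

-- ===== CLAIM (what is proved, stated in full; the proofs are below) =====
def Claim_equal_pick_video_candidate_py : Prop := ∀ (media : List (String × List (List (String × String)))), Dom_pick_video_candidate_py media → Pre_pick_video_candidate_py media → Spec_pick_video_candidate_py media (pick_video_candidate_py media)

-- ===== LEMMAS AND PROOFS =====

-- the variants that contribute a candidate, and the candidate they contribute
def pvKeep (v : List (String × String)) : Bool :=
  match pvGet? v "url" with
  | none => false
  | some url => PySem.Str.startswith url "http"

def pvCand (v : List (String × String)) : Int × String :=
  (pvVariantType v, (pvGet? v "url").getD "")

-- "first minimum so far" step on an optional best candidate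
def pvG (cur : Option (Int × String)) (x : Int × String) : Option (Int × String) :=
  match cur with
  | none => some x
  | some c => if x.1 < c.1 then some x else some c

lemma pvHead_insertBy (x : Int × String) (ys : List (Int × String)) :
    (PySem.List.insertBy (fun a b => decide (a.1 < b.1)) x ys).head? = pvG ys.head? x := by
  cases ys with
  | nil => simp [PySem.List.insertBy, pvG]
  | cons y t =>
      by_cases h : x.1 < y.1 <;> simp [PySem.List.insertBy, pvG, h]

-- head of the insertion-sort fold is the running first-minimum fold
lemma pvHead_foldl_insertBy (t acc : List (Int × String)) :
    (t.foldl (fun a x => PySem.List.insertBy (fun a b => decide (a.1 < b.1)) x a) acc).head?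
      = t.foldl pvG acc.head? := by
  induction t generalizing acc with
  | nil => rfl
  | cons x t ih =>
      simp only [List.foldl_cons]
      rw [ih, pvHead_insertBy]

-- head of the stable sort by priority = first element of minimal priority
lemma pvSorted_head (l : List (Int × String)) :
    (PySem.List.sorted l (fun c => c.1) false).head? = l.foldl pvG none := by
  rw [PySem.List.sorted_eq_foldl_insertBy]
  simpa using pvHead_foldl_insertBy l []

-- B's paired scalar state tracks the optional best candidate
lemma pvB_fold (l : List (Int × String)) (o : Option (Int × String)) :
    l.foldl (fun (st : Option Int × Option String) c =>
        match st.1 with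
        | none => (some c.1, some c.2)
        | some bp => if c.1 < bp then (some c.1, some c.2) else st)
      (o.map (fun c => c.1), o.map (fun c => c.2))
      = ((l.foldl pvG o).map (fun c => c.1), (l.foldl pvG o).map (fun c => c.2)) := by
  induction l generalizing o with
  | nil => rfl
  | cons x t ih =>
      cases o with
      | none => simpa [pvG] using ih (some x)
      | some c =>
          by_cases h : x.1 < c.1
          · simpa [pvG, h] using ih (some x)
          · simpa [pvG, h] using ih (some c)

-- A's candidate loop is filter-then-map
lemma pvA_loop (vvs : List (List (String × String))) :
    vvs.foldl (fun acc variant =>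
        match pvGet? variant "url" with
        | none => acc
        | some url =>
            if PySem.Str.startswith url "http" then acc ++ [(pvVariantType variant, url)]
            else acc) []
      = (vvs.filter pvKeep).map pvCand := by
  rw [PySem.List.foldl_congr_mem _ _
        (fun acc v => if pvKeep v then acc ++ [pvCand v] else acc) _ ?_]
  · simpa using PySem.List.foldl_append_if pvKeep pvCand vvs []
  · intro acc v _
    unfold pvKeep pvCand
    cases h : pvGet? v "url" <;> simp [h]

-- B's loop is the same filter-then-map fed to the first-minimum fold
lemma pvB_loop (vvs : List (List (String × String))) :
    vvs.foldl (fun (st : Option Int × Option String) variant =>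
        match pvGet? variant "url" with
        | none => st
        | some url =>
            if PySem.Str.startswith url "http" then
              let p := pvVariantType variant
              match st.1 with
              | none => (some p, some url)
              | some bp => if p < bp then (some p, some url) else st
            else st) (none, none)
      = ((vvs.filter pvKeep).map pvCand).foldl (fun (st : Option Int × Option String) c =>
          match st.1 with
          | none => (some c.1, some c.2)
          | some bp => if c.1 < bp then (some c.1, some c.2) else st) (none, none) := by
  rw [PySem.List.foldl_congr_mem _ _
        (fun (st : Option Int × Option String) v =>
          if pvKeep v then
            match st.1 with
            | none => (some (pvCand v).1, some (pvCand v).2)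
            | some bp => if (pvCand v).1 < bp then (some (pvCand v).1, some (pvCand v).2) else st
          else st) _ ?_]
  · rw [PySem.List.foldl_if_eq_foldl_filter, List.foldl_map]
  · intro st v _
    unfold pvKeep pvCand
    cases h : pvGet? v "url" <;> simp [h]

-- ===== VERDICT (by name: the statement is the Claim_ definition above) =====
theorem pick_video_candidate_py_spec : Claim_equal_pick_video_candidate_py := by
  intro media _ _
  unfold Spec_pick_video_candidate_py pick_video_candidate_py pick_video_candidate_py_alt
  simp only [pvA_loop, pvB_loop, pvSorted_head]
  rw [show ((none, none) : Option Int × Option String)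
        = ((none : Option (Int × String)).map (fun c => c.1),
           (none : Option (Int × String)).map (fun c => c.2)) from rfl,
      pvB_fold]
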